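-- pv_equiv track=rewrite | github.com/tobbre/ra2223 | src/utils.py | create_triplet_database
-- ===== SOURCE A (Python) =====
-- import itertools
--
-- def create_triplet_database(num_items):
--     '''
--     Generates all possible triplets using itertools.combinations, and then transforms the resulting triplets of form
--     [0, 1, 4] into triplet_bitstrings of form [1, 1, 0, 0, 1].
--     :param num_items: number of items to choose from
--     :return: An array containing all possible triplet_bitstring arrays based on num_items
--     :return: A dictionary: key = (3, 4, 9), value = index of corresponding triplet in triplet_database
--     '''
--     lis = [i for i in itertools.combinations(range(0, num_items), 3)]   # Note that every element is an array like (3, 4, 9)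
--     triplet_database = []
--     database_index_by_triplet_items = {}
--     index = 0
--     for triplet in lis:
--         triplet_bitstring = []
--         position = 0
--         for i in range(num_items):
--             if position != 3:
--                 if i != triplet[position]:
--                     triplet_bitstring.append(0)
--                 else:
--                     triplet_bitstring.append(1)
--                     position += 1
--             else:
--                 triplet_bitstring.append(0)
--         triplet_database.append(triplet_bitstring)
--         database_index_by_triplet_items[triplet] = index
--         index = index + 1
--
--
--     return triplet_database, database_index_by_triplet_items
-- ===== SOURCE B (Python) =====
-- import itertools
--
-- def create_triplet_database(num_items):
--     triplet_database = []
--     database_index_by_triplet_items = {}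
--     for index, triplet in enumerate(itertools.combinations(range(num_items), 3)):
--         bits = [0] * num_items
--         for j in triplet:
--             bits[j] = 1
--         triplet_database.append(bits)
--         database_index_by_triplet_items[triplet] = index
--     return triplet_database, database_index_by_triplet_items
-- ===== Notes on version B (the rewrite author's own statement) =====
-- stated objective: simpler
-- what changed: B builds each bitstring by direct index assignment into a zero list ([0]*n then bits[j]=1 for the three members) instead of A's per-position scan with a position pointer, and drives the index with enumerate instead of a manual counter.
import Mathlib
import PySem

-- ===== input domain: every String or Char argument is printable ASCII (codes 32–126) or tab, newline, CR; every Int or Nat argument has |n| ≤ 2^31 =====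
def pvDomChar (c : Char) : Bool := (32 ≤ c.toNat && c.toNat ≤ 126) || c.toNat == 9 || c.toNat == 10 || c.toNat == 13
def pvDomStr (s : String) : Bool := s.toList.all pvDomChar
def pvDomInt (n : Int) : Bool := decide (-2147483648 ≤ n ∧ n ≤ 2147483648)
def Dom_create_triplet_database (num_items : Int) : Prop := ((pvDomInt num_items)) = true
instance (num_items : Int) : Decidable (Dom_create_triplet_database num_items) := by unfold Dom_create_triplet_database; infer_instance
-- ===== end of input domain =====

-- B replaces A's per-position scan (position pointer, conditional 0/1 append) by direct
-- index assignment into a zero list, and uses enumerate instead of a manual counter: simpler.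

-- ===== PORT A =====
-- itertools.combinations(range(0, n), 3): lexicographic triples a < b < c (exact)
def pvCombos3 (n : Int) : List (List Int) :=
  (PySem.List.pyRange 0 n 1).flatMap (fun a =>
    (PySem.List.pyRange (a+1) n 1).flatMap (fun b =>
      (PySem.List.pyRange (b+1) n 1).map (fun c => [a, b, c])))

def create_triplet_database (num_items : Int) : List (List Int) × (List (List Int × Int)) :=
  let lis := pvCombos3 num_items
  let st := lis.foldl
    (fun (st : (List (List Int) × PySem.Dict (List Int) Int) × Int) triplet =>
      -- inner scan: for i in range(num_items) with position pointer
      -- (triplet[position] is always in range here, so pyGetD is exact)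
      let inner := (PySem.List.pyRange 0 num_items 1).foldl
        (fun (s : List Int × Int) i =>
          if s.2 ≠ 3 then
            if i ≠ PySem.List.pyGetD triplet s.2 0 then (s.1 ++ [0], s.2)
            else (s.1 ++ [1], s.2 + 1)
          else (s.1 ++ [0], s.2))
        ([], 0)
      ((st.1.1 ++ [inner.1], st.1.2.insert triplet st.2), st.2 + 1))
    (([], PySem.Dict.empty), 0)
  (st.1.1, st.1.2.items)

-- ===== PORT B =====
def create_triplet_database_alt (num_items : Int) : List (List Int) × (List (List Int × Int)) :=
  let st := (PySem.List.enumerate (pvCombos3 num_items) 0).foldl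
    (fun (st : List (List Int) × PySem.Dict (List Int) Int) p =>
      -- bits = [0]*num_items; bits[j] = 1 for j in triplet (indices in range, pySetD exact)
      let bits := p.2.foldl (fun bs j => PySem.List.pySetD bs j 1)
        (List.replicate num_items.toNat 0)
      (st.1 ++ [bits], st.2.insert p.2 p.1))
    ([], PySem.Dict.empty)
  (st.1, st.2.items)

-- ===== PRECONDITION & SPEC =====
def Spec_create_triplet_database (num_items : Int) (out : List (List Int) × (List (List Int × Int))) : Prop := out = create_triplet_database_alt num_items
instance (num_items : Int) (out : List (List Int) × (List (List Int × Int))) : Decidable (Spec_create_triplet_database num_items out) := by unfold Spec_create_triplet_database; infer_instance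

-- ===== CLAIM (what is proved, stated in full; the proofs are below) =====
def Claim_equal_create_triplet_database : Prop := ∀ (num_items : Int), Dom_create_triplet_database num_items → Spec_create_triplet_database num_items (create_triplet_database num_items)

-- ===== LEMMAS AND PROOFS =====

-- every member of pvCombos3 n is a strictly increasing triple inside [0, n)
lemma mem_pvCombos3 {n : Int} {t : List Int} (h : t ∈ pvCombos3 n) :
    ∃ a b c : Int, t = [a, b, c] ∧ 0 ≤ a ∧ a < b ∧ b < c ∧ c < n := by
  simp only [pvCombos3, List.mem_flatMap, List.mem_map, PySem.List.mem_pyRange_one] at h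
  obtain ⟨a, ⟨ha0, han⟩, b, ⟨hab, hbn⟩, c, ⟨hbc, hcn⟩, rfl⟩ := h
  exact ⟨a, b, c, rfl, ha0, by omega, by omega, hcn⟩

-- the common value of both inner computations
def pvTarget (m : Nat) (a b c : Int) : List Int :=
  (List.range m).map (fun (i : Nat) => if (i : Int) = a ∨ (i : Int) = b ∨ (i : Int) = c then 1 else 0)

-- A's scan over range(m) with a position pointer yields pvTarget, with the pointer
-- counting the members already passed
lemma scanA (a b c : Int) (ha : 0 ≤ a) (hab : a < b) (hbc : b < c) (m : Nat) :
    (PySem.List.pyRange 0 m 1).foldl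
      (fun (s : List Int × Int) i =>
        if s.2 ≠ 3 then
          if i ≠ PySem.List.pyGetD [a, b, c] s.2 0 then (s.1 ++ [0], s.2)
          else (s.1 ++ [1], s.2 + 1)
        else (s.1 ++ [0], s.2))
      ([], 0)
    = (pvTarget m a b c,
       (if a < m then 1 else 0) + (if b < m then 1 else 0) + (if c < (m : Int) then 1 else 0)) := by
  induction m with
  | zero =>
    simp [pvTarget]
    split_ifs <;> omega
  | succ m ih =>
    have hsplit : PySem.List.pyRange 0 ((m : Int) + 1) 1
        = PySem.List.pyRange 0 (m : Int) 1 ++ [(m : Int)] :=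
      PySem.List.pyRange_one_succ_right (by omega)
    have hm1 : ((m + 1 : Nat) : Int) = (m : Int) + 1 := by push_cast; ring
    have htgt : pvTarget (m + 1) a b c
        = pvTarget m a b c
          ++ [if (m : Int) = a ∨ (m : Int) = b ∨ (m : Int) = c then 1 else 0] := by
      simp [pvTarget, List.range_succ]
    rw [hm1, hsplit, List.foldl_append, ih, htgt]
    rcases lt_trichotomy (m : Int) a with hma | hma | hma
    · rw [(by split_ifs <;> omega :
        ((if a < (m:Int) then (1:Int) else 0) + (if b < (m:Int) then 1 else 0) + (if c < (m:Int) then 1 else 0)) = 0),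
        if_neg (by omega : ¬ ((m:Int) = a ∨ (m:Int) = b ∨ (m:Int) = c))]
      simp [PySem.List.pyGetD]
      rw [if_neg (by omega : ¬ ((m:Int) = a))]
      simp only [Prod.mk.injEq]
      exact ⟨by trivial, by split_ifs <;> omega⟩
    · rw [(by split_ifs <;> omega :
        ((if a < (m:Int) then (1:Int) else 0) + (if b < (m:Int) then 1 else 0) + (if c < (m:Int) then 1 else 0)) = 0),
        if_pos (by omega : (m:Int) = a ∨ (m:Int) = b ∨ (m:Int) = c)]
      simp [PySem.List.pyGetD]
      rw [if_pos hma]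
      simp only [Prod.mk.injEq]
      exact ⟨by trivial, by split_ifs <;> omega⟩
    · rcases lt_trichotomy (m : Int) b with hmb | hmb | hmb
      · rw [(by split_ifs <;> omega :
          ((if a < (m:Int) then (1:Int) else 0) + (if b < (m:Int) then 1 else 0) + (if c < (m:Int) then 1 else 0)) = 1),
          if_neg (by omega : ¬ ((m:Int) = a ∨ (m:Int) = b ∨ (m:Int) = c))]
        simp [PySem.List.pyGetD]
        rw [if_neg (by omega : ¬ ((m:Int) = b))]
        simp only [Prod.mk.injEq]
        exact ⟨by trivial, by split_ifs <;> omega⟩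
      · rw [(by split_ifs <;> omega :
          ((if a < (m:Int) then (1:Int) else 0) + (if b < (m:Int) then 1 else 0) + (if c < (m:Int) then 1 else 0)) = 1),
          if_pos (by omega : (m:Int) = a ∨ (m:Int) = b ∨ (m:Int) = c)]
        simp [PySem.List.pyGetD]
        rw [if_pos hmb]
        simp only [Prod.mk.injEq]
        exact ⟨by trivial, by split_ifs <;> omega⟩
      · rcases lt_trichotomy (m : Int) c with hmc | hmc | hmc
        · rw [(by split_ifs <;> omega :
            ((if a < (m:Int) then (1:Int) else 0) + (if b < (m:Int) then 1 else 0) + (if c < (m:Int) then 1 else 0)) = 2),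
            if_neg (by omega : ¬ ((m:Int) = a ∨ (m:Int) = b ∨ (m:Int) = c))]
          simp [PySem.List.pyGetD]
          rw [if_neg (by omega : ¬ ((m:Int) = c))]
          simp only [Prod.mk.injEq]
          exact ⟨by trivial, by split_ifs <;> omega⟩
        · rw [(by split_ifs <;> omega :
            ((if a < (m:Int) then (1:Int) else 0) + (if b < (m:Int) then 1 else 0) + (if c < (m:Int) then 1 else 0)) = 2),
            if_pos (by omega : (m:Int) = a ∨ (m:Int) = b ∨ (m:Int) = c)]
          simp [PySem.List.pyGetD]
          rw [if_pos hmc]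
          simp only [Prod.mk.injEq]
          exact ⟨by trivial, by split_ifs <;> omega⟩
        · rw [(by split_ifs <;> omega :
            ((if a < (m:Int) then (1:Int) else 0) + (if b < (m:Int) then 1 else 0) + (if c < (m:Int) then 1 else 0)) = 3),
            if_neg (by omega : ¬ ((m:Int) = a ∨ (m:Int) = b ∨ (m:Int) = c))]
          simp
          split_ifs <;> omega

-- B's three direct assignments into a zero list also yield pvTarget
lemma setsB (n : Nat) (a b c : Int) (ha : 0 ≤ a) (hab : a < b) (hbc : b < c) :
    [a, b, c].foldl (fun bs j => PySem.List.pySetD bs j 1) (List.replicate n 0)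
    = pvTarget n a b c := by
  simp only [List.foldl_cons, List.foldl_nil]
  rw [PySem.List.pySetD_of_nonneg _ _ ha, PySem.List.pySetD_of_nonneg _ _ (by omega : (0:Int) ≤ b),
      PySem.List.pySetD_of_nonneg _ _ (by omega : (0:Int) ≤ c)]
  apply List.ext_getElem
  · simp [pvTarget]
  · intro i h1 h2
    have hi : i < n := by simpa using h1
    simp only [pvTarget, List.getElem_set, List.getElem_replicate, List.getElem_map, List.getElem_range]
    by_cases hc : (i : Int) = c
    · rw [if_pos (by omega : c.toNat = i)]
      rw [if_pos (by omega : (i:Int) = a ∨ (i:Int) = b ∨ (i:Int) = c)]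
    · rw [if_neg (by omega : ¬ c.toNat = i)]
      by_cases hb : (i : Int) = b
      · rw [if_pos (by omega : b.toNat = i)]
        rw [if_pos (by omega : (i:Int) = a ∨ (i:Int) = b ∨ (i:Int) = c)]
      · rw [if_neg (by omega : ¬ b.toNat = i)]
        by_cases haa : (i : Int) = a
        · rw [if_pos (by omega : a.toNat = i)]
          rw [if_pos (by omega : (i:Int) = a ∨ (i:Int) = b ∨ (i:Int) = c)]
        · rw [if_neg (by omega : ¬ a.toNat = i)]
          rw [if_neg (by omega : ¬ ((i:Int) = a ∨ (i:Int) = b ∨ (i:Int) = c))]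

lemma outer_fold (n : Int) (l : List (List Int))
    (hl : ∀ t ∈ l, ∃ a b c : Int, t = [a, b, c] ∧ 0 ≤ a ∧ a < b ∧ b < c ∧ c < n) :
    ∀ (db : List (List Int)) (d : PySem.Dict (List Int) Int) (k : Int),
    l.foldl
      (fun (st : (List (List Int) × PySem.Dict (List Int) Int) × Int) triplet =>
        let inner := (PySem.List.pyRange 0 n 1).foldl
          (fun (s : List Int × Int) i =>
            if s.2 ≠ 3 then
              if i ≠ PySem.List.pyGetD triplet s.2 0 then (s.1 ++ [0], s.2)
              else (s.1 ++ [1], s.2 + 1)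
            else (s.1 ++ [0], s.2))
          ([], 0)
        ((st.1.1 ++ [inner.1], st.1.2.insert triplet st.2), st.2 + 1))
      ((db, d), k)
    = ((PySem.List.enumerate l k).foldl
        (fun (st : List (List Int) × PySem.Dict (List Int) Int) p =>
          let bits := p.2.foldl (fun bs j => PySem.List.pySetD bs j 1)
            (List.replicate n.toNat 0)
          (st.1 ++ [bits], st.2.insert p.2 p.1))
        (db, d),
       k + l.length) := by
  induction l with
  | nil => intro db d k; simp [PySem.List.enumerate]
  | cons t l ih =>
    intro db d k
    obtain ⟨a, b, c, rfl, ha, hab, hbc, hcn⟩ := hl t (List.mem_cons_self ..)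
    have hn : n = ((n.toNat : Nat) : Int) := by omega
    have hA : (PySem.List.pyRange 0 n 1).foldl
        (fun (s : List Int × Int) i =>
          if s.2 ≠ 3 then
            if i ≠ PySem.List.pyGetD [a, b, c] s.2 0 then (s.1 ++ [0], s.2)
            else (s.1 ++ [1], s.2 + 1)
          else (s.1 ++ [0], s.2))
        ([], 0)
      = (pvTarget n.toNat a b c,
         (if a < (n.toNat : Int) then 1 else 0) + (if b < (n.toNat : Int) then 1 else 0)
           + (if c < (n.toNat : Int) then 1 else 0)) := by
      rw [hn]; exact scanA a b c ha hab hbc n.toNat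
    have hB : [a, b, c].foldl (fun bs j => PySem.List.pySetD bs j 1) (List.replicate n.toNat 0)
        = pvTarget n.toNat a b c := setsB n.toNat a b c ha hab hbc
    simp only [List.foldl_cons, PySem.List.enumerate_cons, hA, hB,
      ih (fun t ht => hl t (List.mem_cons_of_mem _ ht))]
    simp only [List.length_cons, Prod.mk.injEq]
    exact ⟨by trivial, by push_cast; ring⟩

-- ===== VERDICT (by name: the statement is the Claim_ definition above) =====
theorem create_triplet_database_spec : Claim_equal_create_triplet_database := by
  intro n _
  unfold Spec_create_triplet_database create_triplet_database create_triplet_database_alt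
  dsimp only
  rw [outer_fold n (pvCombos3 n) (fun t ht => mem_pvCombos3 ht)]
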